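-- pv_equiv track=rewrite | github.com/Lecrut/Diffusion-code-generation | data/code/72_9_1.py | compare_elements_at_indices
-- ===== SOURCE A (Python) =====
-- def compare_elements_at_indices(lists, indices):
--     results = {}
--     for i in indices:
--         if i < 0:
--             raise ValueError("Indices must be non-negative")
--         if len(lists) == 0:
--             results[i] = None
--             continue
--         values = [lst[i] for lst in lists if i < len(lst)]
--         if not values:
--             results[i] = None
--         else:
--             results[i] = tuple(values)
--     return results
-- ===== SOURCE B (Python) =====
-- def compare_elements_at_indices(lists, indices):
--     for i in indices:
--         if i < 0:
--             raise ValueError("Indices must be non-negative")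
--     cols = [[] for _ in range(max(map(len, lists), default=0))]
--     for lst in lists:
--         for j in range(len(lst)):
--             cols[j].append(lst[j])
--     return {i: tuple(cols[i]) if i < len(cols) else None for i in indices}
-- ===== Notes on version B (the rewrite author's own statement) =====
-- stated objective: faster
-- what changed: A answers each index by rescanning every list with a per-index filter; B builds the full positional transpose of the lists once in a single enumerate-style sweep (no index involved) and then answers every index by an O(1) table lookup, with the None/empty-column case falling out of the table length instead of an emptiness test.
import Mathlib
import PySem

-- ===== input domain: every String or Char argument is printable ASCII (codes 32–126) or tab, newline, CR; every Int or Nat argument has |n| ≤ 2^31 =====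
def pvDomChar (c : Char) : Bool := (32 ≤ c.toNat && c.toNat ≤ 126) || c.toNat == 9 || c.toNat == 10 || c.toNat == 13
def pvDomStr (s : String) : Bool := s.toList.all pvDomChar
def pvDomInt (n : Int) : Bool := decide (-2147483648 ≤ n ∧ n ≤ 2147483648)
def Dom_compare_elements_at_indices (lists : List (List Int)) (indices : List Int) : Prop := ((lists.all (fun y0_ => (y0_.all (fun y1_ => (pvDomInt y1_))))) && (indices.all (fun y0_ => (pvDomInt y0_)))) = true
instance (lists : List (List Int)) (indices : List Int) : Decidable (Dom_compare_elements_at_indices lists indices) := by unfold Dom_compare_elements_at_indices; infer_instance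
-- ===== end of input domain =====

-- B replaces A's per-index rescan of all lists by one positional-transpose table built in a
-- single sweep, after which every index is answered by a table lookup (objective: faster).

-- ===== PORT A =====
-- A, step for step: a dict built over indices; for each i the comprehension
-- 'values = [lst[i] for lst in lists if i < len(lst)]' (pyGetD is exact under the guard i < len(lst),
-- with 0 ≤ i from Pre_); 'raise ValueError' on i < 0 is outside Pre_ (the port skips such i).
def compare_elements_at_indices (lists : List (List Int)) (indices : List Int) : List (Int × Option (List Int)) :=
  (indices.foldl (fun (d : PySem.Dict Int (Option (List Int))) i =>
      if i < 0 then d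
      else if lists.length = 0 then d.insert i none
      else
        let values := (lists.filter (fun lst => decide (i < (lst.length : Int)))).map
                        (fun lst => PySem.List.pyGetD lst i 0)
        if values.isEmpty then d.insert i none else d.insert i (some values))
    PySem.Dict.empty).items

-- ===== PORT B =====
-- the inner loop of B's transpose sweep: 'for j in range(len(lst)): cols[j].append(lst[j])'
def pvColsAdd (cs : List (List Int)) (lst : List Int) : List (List Int) :=
  (List.range lst.length).foldl (fun cs' j => cs'.modify j (fun v => v ++ [lst[j]!])) cs

-- B, step for step: the raise-only validation loop contributes nothing inside Pre_ (all indices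
-- nonnegative); 'cols = [[] for _ in range(max(map(len, lists), default=0))]' is the replicate,
-- then the transpose sweep over lists, then the dict comprehension looking each index up in cols.
def compare_elements_at_indices_alt (lists : List (List Int)) (indices : List Int) : List (Int × Option (List Int)) :=
  let cols := lists.foldl pvColsAdd
    (List.replicate (lists.foldl (fun m lst => max m lst.length) 0) [])
  (indices.foldl (fun (d : PySem.Dict Int (Option (List Int))) i =>
      d.insert i (if i < (cols.length : Int) then some (PySem.List.pyGetD cols i []) else none))
    PySem.Dict.empty).items

-- ===== PRECONDITION & SPEC =====
-- Pre_ excludes any negative index, on which A raises ValueError.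
def Pre_compare_elements_at_indices (_lists : List (List Int)) (indices : List Int) : Prop :=
  ∀ i ∈ indices, 0 ≤ i
instance (lists : List (List Int)) (indices : List Int) : Decidable (Pre_compare_elements_at_indices lists indices) := by unfold Pre_compare_elements_at_indices; infer_instance
def pvWitness_compare_elements_at_indices : List (List Int) × List Int := ([[1, 2], [3]], [0, 1, 5, 0])

def Spec_compare_elements_at_indices (lists : List (List Int)) (indices : List Int) (out : List (Int × Option (List Int))) : Prop := out = compare_elements_at_indices_alt lists indices
instance (lists : List (List Int)) (indices : List Int) (out : List (Int × Option (List Int))) : Decidable (Spec_compare_elements_at_indices lists indices out) := by unfold Spec_compare_elements_at_indices; infer_instance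

-- ===== CLAIM (what is proved, stated in full; the proofs are below) =====
def Claim_equal_compare_elements_at_indices : Prop := ∀ (lists : List (List Int)) (indices : List Int), Dom_compare_elements_at_indices lists indices → Pre_compare_elements_at_indices lists indices → Spec_compare_elements_at_indices lists indices (compare_elements_at_indices lists indices)

-- ===== LEMMAS AND PROOFS =====

-- the per-index column A computes (Int index)
def pvCol (lists : List (List Int)) (i : Int) : List Int :=
  (lists.filter (fun lst => decide (i < (lst.length : Int)))).map (fun lst => PySem.List.pyGetD lst i 0)

-- the common per-index result value
def pvVal (lists : List (List Int)) (i : Int) : Option (List Int) :=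
  if (pvCol lists i).isEmpty then none else some (pvCol lists i)

-- the same column with a Nat index (B's table entry)
def pvColN (lists : List (List Int)) (k : Nat) : List Int :=
  (lists.filter (fun lst => decide (k < lst.length))).map (fun lst => lst.getD k 0)

-- items of a Nodup-keyed dict are keys paired with their values
theorem pv_items_eq_map_keys {ν : Type} (d : PySem.Dict Int ν) (d0 : ν) (h : d.keys.Nodup) :
    d.items = d.keys.map (fun k => (k, d.getD k d0)) := by
  have hk : d.keys = d.items.map (·.1) := by simp [PySem.Dict.keys]
  rw [hk, List.map_map]
  have hid : ∀ p ∈ d.items, ((fun k => (k, d.getD k d0)) ∘ (·.1)) p = id p := by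
    intro p hp
    have h1 : d.getD p.1 d0 = p.2 :=
      PySem.Dict.getD_of_mem_items d (show (p.1, p.2) ∈ d.items by simpa using hp) h d0
    simp [h1]
  rw [List.map_congr_left hid, List.map_id]

-- getD through a fold of inserts whose value depends only on the key
theorem pv_getD_foldl_insert {ν : Type} (f : Int → ν) (d0 : ν) :
    ∀ (l : List Int) (d : PySem.Dict Int ν) (k : Int),
      (l.foldl (fun d i => d.insert i (f i)) d).getD k d0 =
        if k ∈ l then f k else d.getD k d0 := by
  intro l
  induction l with
  | nil => simp
  | cons x xs ih =>
    intro d k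
    simp only [List.foldl_cons, ih, List.mem_cons]
    by_cases hx : k ∈ xs
    · simp [hx]
    · by_cases hk : k = x <;> simp [hx, hk, PySem.Dict.getD_insert]

-- a fold of modifies preserves the table length
theorem pv_length_foldl_modify (f : Nat → List Int → List Int) :
    ∀ (l : List Nat) (cs : List (List Int)),
      (l.foldl (fun cs' j => cs'.modify j (f j)) cs).length = cs.length := by
  intro l
  induction l with
  | nil => simp
  | cons x xs ih => intro cs; simp [ih]

-- entries after B's inner sweep over range n: each slot below n modified exactly once
theorem pv_get?_foldl_range (f : Nat → List Int → List Int) :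
    ∀ (n : Nat) (cs : List (List Int)) (k : Nat),
      ((List.range n).foldl (fun cs' j => cs'.modify j (f j)) cs)[k]? =
        if k < n then cs[k]?.map (f k) else cs[k]? := by
  intro n
  induction n with
  | zero => simp
  | succ n ih =>
    intro cs k
    rw [List.range_succ, List.foldl_append, List.foldl_cons, List.foldl_nil,
        List.getElem?_modify, ih]
    by_cases hk : k = n
    · subst hk; simp [Option.map_eq_map]
    · have hnk : n ≠ k := fun h => hk h.symm
      by_cases h1 : k < n
      · have h2 : k < n + 1 := by omega
        simp [h1, h2, hnk]
      · have h2 : ¬ k < n + 1 := by omega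
        simp [h1, h2, hnk]

-- one list's contribution to the table
theorem pv_get?_colsAdd (cs : List (List Int)) (lst : List Int) (k : Nat) :
    (pvColsAdd cs lst)[k]? =
      cs[k]?.map (fun v => v ++ (if k < lst.length then [lst.getD k 0] else [])) := by
  unfold pvColsAdd
  rw [pv_get?_foldl_range]
  by_cases hk : k < lst.length
  · simp [hk, List.getD]
  · simp [hk]

theorem pv_length_colsAdd (cs : List (List Int)) (lst : List Int) :
    (pvColsAdd cs lst).length = cs.length := by
  unfold pvColsAdd; exact pv_length_foldl_modify _ _ _

-- the finished table: slot k holds the initial slot followed by column k of the lists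
theorem pv_get?_outer :
    ∀ (lists : List (List Int)) (cs : List (List Int)) (k : Nat),
      (lists.foldl pvColsAdd cs)[k]? = cs[k]?.map (fun v => v ++ pvColN lists k) := by
  intro lists
  induction lists with
  | nil =>
    intro cs k
    simp [pvColN]
  | cons lst rest ih =>
    intro cs k
    rw [List.foldl_cons, ih, pv_get?_colsAdd, Option.map_map]
    have hcol : pvColN (lst :: rest) k =
        (if k < lst.length then [lst.getD k 0] else []) ++ pvColN rest k := by
      by_cases hk : k < lst.length <;> simp [pvColN, hk]
    simp [hcol, Function.comp_def, List.append_assoc, List.getD]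

theorem pv_length_outer :
    ∀ (lists : List (List Int)) (cs : List (List Int)),
      (lists.foldl pvColsAdd cs).length = cs.length := by
  intro lists
  induction lists with
  | nil => intro cs; rfl
  | cons lst rest ih => intro cs; rw [List.foldl_cons, ih, pv_length_colsAdd]

-- the running maximum characterised
theorem pv_lt_foldl_max :
    ∀ (lists : List (List Int)) (m k : Nat),
      k < lists.foldl (fun m lst => max m lst.length) m ↔
        k < m ∨ ∃ lst ∈ lists, k < lst.length := by
  intro lists
  induction lists with
  | nil => intro m k; simp
  | cons lst rest ih =>
    intro m k
    rw [List.foldl_cons, ih]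
    simp only [lt_max_iff, List.mem_cons]
    constructor
    · rintro ((h | h) | ⟨l, hl, hkl⟩)
      · exact Or.inl h
      · exact Or.inr ⟨lst, Or.inl rfl, h⟩
      · exact Or.inr ⟨l, Or.inr hl, hkl⟩
    · rintro (h | ⟨l, (rfl | hl), hkl⟩)
      · exact Or.inl (Or.inl h)
      · exact Or.inl (Or.inr hkl)
      · exact Or.inr ⟨l, hl, hkl⟩

-- the empty column characterised
theorem pv_colN_eq_nil (lists : List (List Int)) (k : Nat) :
    pvColN lists k = [] ↔ ∀ lst ∈ lists, ¬ k < lst.length := by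
  simp [pvColN, List.filter_eq_nil_iff]

-- A's column equals B's Nat-indexed column on nonnegative indices
theorem pv_col_eq_colN (lists : List (List Int)) (n : Nat) :
    pvCol lists (n : Int) = pvColN lists n := by
  unfold pvCol pvColN
  have hp : ∀ lst : List Int, decide ((n : Int) < (lst.length : Int)) = decide (n < lst.length) := by
    intro lst; simp
  rw [List.filter_congr (fun lst _ => hp lst)]
  exact List.map_congr_left (fun lst _ => by simp [PySem.List.pyGetD_natCast, List.getD])

-- B's lookup value equals the common per-index value
theorem pv_lookup_eq_val (lists : List (List Int)) (i : Int) (hi : 0 ≤ i) :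
    (if i < (((lists.foldl pvColsAdd
          (List.replicate (lists.foldl (fun m lst => max m lst.length) 0) [])).length : Nat) : Int)
      then some (PySem.List.pyGetD (lists.foldl pvColsAdd
          (List.replicate (lists.foldl (fun m lst => max m lst.length) 0) [])) i [])
      else none) = pvVal lists i := by
  obtain ⟨n, rfl⟩ : ∃ n : Nat, i = (n : Int) := ⟨i.toNat, (Int.toNat_of_nonneg hi).symm⟩
  set M := lists.foldl (fun m lst => max m lst.length) 0 with hM
  have hlen : (lists.foldl pvColsAdd (List.replicate M [])).length = M := by
    rw [pv_length_outer, List.length_replicate]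
  have hget := pv_get?_outer lists (List.replicate M []) n
  rw [pvVal, pv_col_eq_colN]
  by_cases hn : n < M
  · have hcast : ((n : Int) < ((lists.foldl pvColsAdd (List.replicate M [])).length : Int)) := by
      rw [hlen]; exact_mod_cast hn
    rw [if_pos hcast, PySem.List.pyGetD_natCast]
    have : (lists.foldl pvColsAdd (List.replicate M []))[n]? = some (pvColN lists n) := by
      rw [hget, List.getElem?_replicate, if_pos hn]; simp
    have hne : pvColN lists n ≠ [] := by
      intro hnil
      have := (pv_colN_eq_nil lists n).mp hnil
      have := (pv_lt_foldl_max lists 0 n).mp (hM ▸ hn)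
      rcases this with h | ⟨lst, hl, hkl⟩
      · omega
      · exact ((pv_colN_eq_nil lists n).mp hnil) lst hl hkl
    rw [if_neg (by simpa [List.isEmpty_iff] using hne)]
    simp [List.getD, this]
  · have hcast : ¬ ((n : Int) < ((lists.foldl pvColsAdd (List.replicate M [])).length : Int)) := by
      rw [hlen]; exact_mod_cast hn
    rw [if_neg hcast]
    have hnil : pvColN lists n = [] := by
      rw [pv_colN_eq_nil]
      intro lst hl hkl
      exact hn ((pv_lt_foldl_max lists 0 n).mpr (Or.inr ⟨lst, hl, hkl⟩))
    rw [if_pos (by simp [hnil])]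

-- A's result as a map over the deduplicated indices
theorem pv_A_eq (lists : List (List Int)) (indices : List Int)
    (hpre : ∀ i ∈ indices, 0 ≤ i) :
    compare_elements_at_indices lists indices =
      (PySem.Set.ofList indices).map (fun k => (k, pvVal lists k)) := by
  unfold compare_elements_at_indices
  have hcongr : indices.foldl (fun (d : PySem.Dict Int (Option (List Int))) i =>
      if i < 0 then d
      else if lists.length = 0 then d.insert i none
      else
        let values := (lists.filter (fun lst => decide (i < (lst.length : Int)))).map
                        (fun lst => PySem.List.pyGetD lst i 0)
        if values.isEmpty then d.insert i none else d.insert i (some values)) PySem.Dict.empty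
      = indices.foldl (fun d i => d.insert i (pvVal lists i)) PySem.Dict.empty := by
    apply PySem.List.foldl_congr_mem
    intro d i hi
    have h0 : ¬ i < 0 := not_lt.mpr (hpre i hi)
    rw [if_neg h0]
    by_cases hnil : lists.length = 0
    · have : lists = [] := List.length_eq_zero_iff.mp hnil
      subst this
      simp [pvVal, pvCol]
    · rw [if_neg hnil]
      simp only [pvVal, pvCol]
      by_cases he : ((lists.filter (fun lst => decide (i < (lst.length : Int)))).map
                        (fun lst => PySem.List.pyGetD lst i 0)).isEmpty <;> simp [he]
  rw [hcongr]
  have hkeys : (indices.foldl (fun (d : PySem.Dict Int (Option (List Int))) i =>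
      d.insert i (pvVal lists i)) PySem.Dict.empty).keys = PySem.Set.ofList indices := by
    rw [PySem.Dict.keys_foldl_insert]
    simp [PySem.Set.update_nil_left, PySem.Dict.keys_empty]
  rw [pv_items_eq_map_keys _ none
        (by rw [hkeys]; exact PySem.Set.nodup_ofList indices), hkeys]
  apply List.map_congr_left
  intro k hk
  rw [pv_getD_foldl_insert]
  simp [(PySem.Set.mem_ofList indices k).mp hk]

-- B's result as a map over the deduplicated indices
theorem pv_B_eq (lists : List (List Int)) (indices : List Int)
    (hpre : ∀ i ∈ indices, 0 ≤ i) :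
    compare_elements_at_indices_alt lists indices =
      (PySem.Set.ofList indices).map (fun k => (k, pvVal lists k)) := by
  unfold compare_elements_at_indices_alt
  simp only []
  have hkeys : (indices.foldl (fun (d : PySem.Dict Int (Option (List Int))) i =>
      d.insert i (if i < (((lists.foldl pvColsAdd
          (List.replicate (lists.foldl (fun m lst => max m lst.length) 0) [])).length : Nat) : Int)
        then some (PySem.List.pyGetD (lists.foldl pvColsAdd
          (List.replicate (lists.foldl (fun m lst => max m lst.length) 0) [])) i [])
        else none)) PySem.Dict.empty).keys = PySem.Set.ofList indices := by
    rw [PySem.Dict.keys_foldl_insert]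
    simp [PySem.Set.update_nil_left, PySem.Dict.keys_empty]
  rw [pv_items_eq_map_keys _ none
        (by rw [hkeys]; exact PySem.Set.nodup_ofList indices), hkeys]
  apply List.map_congr_left
  intro k hk
  have hkmem : k ∈ indices := (PySem.Set.mem_ofList indices k).mp hk
  rw [pv_getD_foldl_insert, if_pos hkmem, pv_lookup_eq_val lists k (hpre k hkmem)]

-- ===== VERDICT (by name: the statement is the Claim_ definition above) =====
theorem compare_elements_at_indices_spec : Claim_equal_compare_elements_at_indices := by
  intro lists indices _ hpre
  unfold Spec_compare_elements_at_indices
  rw [pv_A_eq lists indices hpre, pv_B_eq lists indices hpre]
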